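-- pv_equiv track=rewrite | github.com/gdanezis/Design_and_Professional_Skills | Topics/02_Data_Structures/src/binarysearch.py | isin_bisect
-- ===== SOURCE A (Python) =====
-- def isin_bisect(seq, val):
--     """ Resturns True if val is within the sorted sequence seq. """
--     range_start = 0
--     range_end = len(seq)
--     diff = range_end - range_start
--
--     while (diff > 1):
--         range_mid = (range_start + range_end) // 2
--         if seq[range_mid] <= val:
--             range_start = range_mid
--         else:
--             range_end = range_mid
--
--         assert diff > (range_end - range_start) # Ensure progress
--         diff = range_end - range_start
--
--     return (seq[range_start] == val)
-- ===== SOURCE B (Python) =====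
-- def isin_bisect(seq, val):
--     """Recursive binary search by halving the sequence itself (slices)."""
--     if len(seq) <= 1:
--         return seq[0] == val
--     mid = len(seq) // 2
--     if seq[mid] <= val:
--         return isin_bisect(seq[mid:], val)
--     return isin_bisect(seq[:mid], val)
-- ===== Notes on version B (the rewrite author's own statement) =====
-- stated objective: alternative
-- what changed: Replaces the iterative two-index (range_start/range_end) while-loop by a recursion that halves the sequence itself with slices seq[mid:] / seq[:mid]; same comparison path, so identical results on sorted, unsorted and duplicate inputs.
import Mathlib
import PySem

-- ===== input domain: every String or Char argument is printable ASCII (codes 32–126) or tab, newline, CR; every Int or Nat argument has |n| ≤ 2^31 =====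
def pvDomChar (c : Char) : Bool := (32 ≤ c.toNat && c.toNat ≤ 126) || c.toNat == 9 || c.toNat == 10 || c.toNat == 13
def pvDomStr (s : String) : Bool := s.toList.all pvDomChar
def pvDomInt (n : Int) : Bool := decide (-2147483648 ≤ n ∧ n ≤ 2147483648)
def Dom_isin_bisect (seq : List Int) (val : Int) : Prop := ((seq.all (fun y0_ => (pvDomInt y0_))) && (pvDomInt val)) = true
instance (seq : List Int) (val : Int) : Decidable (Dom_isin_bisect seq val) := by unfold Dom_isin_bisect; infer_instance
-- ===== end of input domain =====

-- B halves the sequence itself with slices instead of A's two-index while-loop; same comparison path, so same result.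

-- ===== PORT A =====
-- A's while-loop over (range_start, range_end); indices stay in [0, len) when seq ≠ [],
-- so seq[range_mid] is ported as getD (exact in range; empty seq raises and is outside Pre_).
def isin_loopA (seq : List Int) (val : Int) (s e : Nat) : Nat :=
  if e - s > 1 then
    if seq.getD ((s + e) / 2) 0 ≤ val then isin_loopA seq val ((s + e) / 2) e
    else isin_loopA seq val s ((s + e) / 2)
  else s
termination_by e - s
decreasing_by all_goals omega

def isin_bisect (seq : List Int) (val : Int) : Bool :=
  seq.getD (isin_loopA seq val 0 seq.length) 0 == val

-- ===== PORT B =====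
-- seq[mid:] / seq[:mid] with 0 ≤ mid ≤ len are exactly drop/take (PySem.List.slice_from_natCast / slice_to_natCast).
def isin_bisect_alt (seq : List Int) (val : Int) : Bool :=
  if seq.length ≤ 1 then seq.getD 0 0 == val
  else
    if seq.getD (seq.length / 2) 0 ≤ val then
      isin_bisect_alt (seq.drop (seq.length / 2)) val
    else
      isin_bisect_alt (seq.take (seq.length / 2)) val
termination_by seq.length
decreasing_by all_goals simp; omega

-- ===== PRECONDITION & SPEC =====
-- Pre_ excludes only the empty list, on which the Python A raises IndexError (seq[range_start] with range_start = 0).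
def Pre_isin_bisect (seq : List Int) (val : Int) : Prop := seq ≠ []
instance (seq : List Int) (val : Int) : Decidable (Pre_isin_bisect seq val) := by unfold Pre_isin_bisect; infer_instance
def pvWitness_isin_bisect : List Int × Int := ([1, 2, 3], 2)

def Spec_isin_bisect (seq : List Int) (val : Int) (out : Bool) : Prop := out = isin_bisect_alt seq val
instance (seq : List Int) (val : Int) (out : Bool) : Decidable (Spec_isin_bisect seq val out) := by unfold Spec_isin_bisect; infer_instance

-- ===== CLAIM =====
def Claim_equal_isin_bisect : Prop := ∀ (seq : List Int) (val : Int), Dom_isin_bisect seq val → Pre_isin_bisect seq val → Spec_isin_bisect seq val (isin_bisect seq val)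

-- ===== LEMMAS AND PROOFS =====

lemma isin_sub_getD (seq : List Int) (s k i : Nat) (h : i < k) :
    ((seq.drop s).take k).getD i 0 = seq.getD (s + i) 0 := by
  simp [List.getD_eq_getElem?_getD, List.getElem?_take_of_lt h, List.getElem?_drop]

lemma isin_key (seq : List Int) (val : Int) :
    ∀ (d s e : Nat), e - s ≤ d → s < e → e ≤ seq.length →
    isin_bisect_alt ((seq.drop s).take (e - s)) val
      = (seq.getD (isin_loopA seq val s e) 0 == val) := by
  intro d
  induction d with
  | zero => intro s e hle h1 _; omega
  | succ d ih =>
    intro s e hle h1 h2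
    have hL : ((seq.drop s).take (e - s)).length = e - s := by
      simp; omega
    rw [isin_loopA, isin_bisect_alt]
    by_cases hbig : e - s > 1
    · have hne : ¬ ((seq.drop s).take (e - s)).length ≤ 1 := by omega
      have hmid : s + (e - s) / 2 = (s + e) / 2 := by omega
      have hget : ((seq.drop s).take (e - s)).getD (((seq.drop s).take (e - s)).length / 2) 0
          = seq.getD ((s + e) / 2) 0 := by
        rw [hL, isin_sub_getD seq s (e - s) ((e - s) / 2) (by omega), hmid]
      simp only [hne, if_false, hbig, if_true, hget]
      by_cases hc : seq.getD ((s + e) / 2) 0 ≤ val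
      · simp only [hc, if_true]
        rw [hL, List.drop_take, List.drop_drop, hmid]
        have : e - s - (e - s) / 2 = e - (s + e) / 2 := by omega
        rw [this]
        exact ih ((s + e) / 2) e (by omega) (by omega) h2
      · simp only [hc, if_false]
        rw [hL, List.take_take, min_eq_left (by omega : (e - s) / 2 ≤ e - s)]
        have : (e - s) / 2 = (s + e) / 2 - s := by omega
        rw [this]
        exact ih s ((s + e) / 2) (by omega) (by omega) (by omega)
    · have h1' : e - s = 1 := by omega
      have hle1 : ((seq.drop s).take (e - s)).length ≤ 1 := by omega
      simp only [hbig, if_false, hle1, if_true]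
      rw [h1', isin_sub_getD seq s 1 0 (by omega), Nat.add_zero]

-- ===== VERDICT =====
theorem isin_bisect_spec : Claim_equal_isin_bisect := by
  intro seq val _ hpre
  unfold Spec_isin_bisect isin_bisect
  have hlen : 0 < seq.length := List.length_pos_iff.mpr hpre
  have := isin_key seq val seq.length 0 seq.length (by omega) hlen (le_refl _)
  simpa using this.symm
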